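-- pv_equiv track=rewrite | github.com/Matspachee/SSTDL2 | PROGRESO/TAREA 1 ANALIZADOR LEXICO/AnalizadorLexico.py | analyze_token
-- ===== SOURCE A (Python) =====
-- def analyze_token(token):
--     state = 0
--     for char in token:
--         if state == 0:
--             if char.isdigit():
--                 state = 1
--             elif char.isalpha() or char == "_":
--                 state = 3
--             elif char == ".":
--                 state = 5
--             else:
--                 state = 5
--         elif state == 1:
--             if char.isdigit():
--                 state = 1
--             elif char == ".":
--                 state = 2
--             else:
--                 state = 5
--         elif state == 2:
--             if char.isdigit():
--                 state = 2
--             else: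
--                 state = 5
--         elif state == 3:
--             if char.isalnum() or char == "_":
--                 state = 3
--             else:
--                 state = 5
--         elif state == 5:
--             break
--
--     if state == 1:
--         return f"{token} = INT"
--     elif state == 2:
--         return f"{token} = FLOAT"
--     elif state == 3:
--         return f"{token} = ID"
--     else:
--         return f"{token} = ERROR"
-- ===== SOURCE B (Python) =====
-- def analyze_token(token):
--     # Flat whole-string classification via partition instead of a character DFA.
--     head, dot, tail = token.partition(".")
--     if token and all(c.isdigit() for c in token):
--         kind = "INT"
--     elif dot and head and all(c.isdigit() for c in head) and all(c.isdigit() for c in tail):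
--         kind = "FLOAT"
--     elif token and (token[0].isalpha() or token[0] == "_") and all(c.isalnum() or c == "_" for c in token[1:]):
--         kind = "ID"
--     else:
--         kind = "ERROR"
--     return f"{token} = {kind}"
-- ===== Notes on version B (the rewrite author's own statement) =====
-- stated objective: simpler
-- what changed: Replaces the per-character DFA state machine by flat whole-string category checks: INT = nonempty all-digits, FLOAT = partition at the first '.' with a nonempty digit head and digit-only tail, ID = letter/underscore start with word characters after; no state variable and no transition table.
import Mathlib
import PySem

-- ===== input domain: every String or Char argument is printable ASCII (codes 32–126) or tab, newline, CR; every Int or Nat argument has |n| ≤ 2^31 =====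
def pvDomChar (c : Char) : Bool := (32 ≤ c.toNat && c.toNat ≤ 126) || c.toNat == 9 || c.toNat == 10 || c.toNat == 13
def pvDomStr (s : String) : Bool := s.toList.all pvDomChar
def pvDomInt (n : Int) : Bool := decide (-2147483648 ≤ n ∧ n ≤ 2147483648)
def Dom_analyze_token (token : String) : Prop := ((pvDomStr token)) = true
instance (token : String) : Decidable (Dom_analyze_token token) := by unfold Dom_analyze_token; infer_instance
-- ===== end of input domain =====

-- B replaces A's per-character DFA by flat whole-string category checks built on str.partition ('simpler').

-- ===== PORT A =====
-- the for-loop over the characters; 'break' in state 5 = return the state there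
def analyzeLoop (state : Nat) (cs : List Char) : Nat :=
  match cs with
  | [] => state
  | c :: rest =>
    if state = 0 then
      if PySem.Chars.isdigit c then analyzeLoop 1 rest
      else if PySem.Chars.isalpha c || c == '_' then analyzeLoop 3 rest
      else if c == '.' then analyzeLoop 5 rest
      else analyzeLoop 5 rest
    else if state = 1 then
      if PySem.Chars.isdigit c then analyzeLoop 1 rest
      else if c == '.' then analyzeLoop 2 rest
      else analyzeLoop 5 rest
    else if state = 2 then
      if PySem.Chars.isdigit c then analyzeLoop 2 rest
      else analyzeLoop 5 rest
    else if state = 3 then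
      if PySem.Chars.isalnum c || c == '_' then analyzeLoop 3 rest
      else analyzeLoop 5 rest
    else if state = 5 then
      state                       -- break
    else
      analyzeLoop state rest      -- unreachable other states: loop continues unchanged

def analyze_token (token : String) : String :=
  let state := analyzeLoop 0 token.toList
  if state = 1 then token ++ " = INT"
  else if state = 2 then token ++ " = FLOAT"
  else if state = 3 then token ++ " = ID"
  else token ++ " = ERROR"

-- ===== PORT B =====
def analyze_token_alt (token : String) : String :=
  let cs := token.toList
  -- hand port of token.partition("."), exact: head = chars before the first '.',
  -- dot = the '.' and everything from it (empty iff no '.'), tail = chars after the first '.'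
  let head := cs.takeWhile (fun c => c != '.')
  let dot := cs.dropWhile (fun c => c != '.')
  let tail := dot.tail
  let kind :=
    if !cs.isEmpty && cs.all PySem.Chars.isdigit then "INT"
    else if !dot.isEmpty && !head.isEmpty && head.all PySem.Chars.isdigit
            && tail.all PySem.Chars.isdigit then "FLOAT"
    else if (match cs with
             | [] => false
             | c :: rest => (PySem.Chars.isalpha c || c == '_')
                 && rest.all (fun x => PySem.Chars.isalnum x || x == '_')) then "ID"
    else "ERROR"
  token ++ " = " ++ kind

-- ===== PRECONDITION & SPEC =====
def Spec_analyze_token (token : String) (out : String) : Prop := out = analyze_token_alt token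
instance (token : String) (out : String) : Decidable (Spec_analyze_token token out) := by unfold Spec_analyze_token; infer_instance

-- ===== CLAIM (what is proved, stated in full; the proofs are below) =====
def Claim_equal_analyze_token : Prop := ∀ (token : String), Dom_analyze_token token → Spec_analyze_token token (analyze_token token)

-- ===== LEMMAS AND PROOFS =====

theorem loop5 (cs : List Char) : analyzeLoop 5 cs = 5 := by
  cases cs <;> simp [analyzeLoop]

theorem loop2 (cs : List Char) :
    analyzeLoop 2 cs = if cs.all PySem.Chars.isdigit then 2 else 5 := by
  induction cs with
  | nil => simp [analyzeLoop]
  | cons c rest ih =>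
    by_cases h : PySem.Chars.isdigit c = true
    · simp [analyzeLoop, h, ih]
    · simp only [Bool.not_eq_true] at h
      simp [analyzeLoop, h, loop5]

theorem loop3 (cs : List Char) :
    analyzeLoop 3 cs =
      if cs.all (fun x => PySem.Chars.isalnum x || x == '_') then 3 else 5 := by
  induction cs with
  | nil => simp [analyzeLoop]
  | cons c rest ih =>
    by_cases h : (PySem.Chars.isalnum c || c == '_') = true
    · simp [analyzeLoop, h, ih]
    · simp only [Bool.not_eq_true] at h
      simp [analyzeLoop, h, loop5]

theorem loop1 (cs : List Char) :
    analyzeLoop 1 cs =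
      match cs.dropWhile PySem.Chars.isdigit with
      | [] => 1
      | c :: t => if c = '.' ∧ t.all PySem.Chars.isdigit then 2 else 5 := by
  induction cs with
  | nil => simp [analyzeLoop]
  | cons c rest ih =>
    by_cases h : PySem.Chars.isdigit c = true
    · simpa [analyzeLoop, h] using ih
    · simp only [Bool.not_eq_true] at h
      by_cases hdot : c = '.'
      · subst hdot
        simp [analyzeLoop, h, loop2]
      · simp [analyzeLoop, h, hdot, loop5]

-- character-class facts specific to the two ports
theorem dig_not_alpha {c : Char} (h : PySem.Chars.isdigit c = true) :
    PySem.Chars.isalpha c = false := by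
  unfold PySem.Chars.isdigit at h
  unfold PySem.Chars.isalpha PySem.Chars.isupper PySem.Chars.islower
  simp at h ⊢
  refine ⟨fun hA => ?_, fun hA => ?_⟩
  · exact ((by decide : ¬ ('A' ≤ '9')) (le_trans hA h.2)).elim
  · exact ((by decide : ¬ ('a' ≤ '9')) (le_trans hA h.2)).elim

theorem dig_ne_underscore {c : Char} (h : PySem.Chars.isdigit c = true) : c ≠ '_' := by
  intro he; subst he; exact absurd h (by decide)

theorem dig_ne_dot {c : Char} (h : PySem.Chars.isdigit c = true) : c ≠ '.' := by
  intro he; subst he; exact absurd h (by decide)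

theorem dropWhile_head_false {p : Char → Bool} {l : List Char} {x : Char} {xs : List Char}
    (h : l.dropWhile p = x :: xs) : p x = false := by
  have := List.head_dropWhile_not p (l := l) (by simp [h])
  simpa [h] using this

-- the central fact: A's DFA kind equals B's category kind, on the character list
theorem kind_eq (cs : List Char) :
    (if analyzeLoop 0 cs = 1 then "INT"
     else if analyzeLoop 0 cs = 2 then "FLOAT"
     else if analyzeLoop 0 cs = 3 then "ID" else "ERROR")
    = (if !cs.isEmpty && cs.all PySem.Chars.isdigit then "INT"
       else if !(cs.dropWhile (fun c => c != '.')).isEmpty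
               && !(cs.takeWhile (fun c => c != '.')).isEmpty
               && (cs.takeWhile (fun c => c != '.')).all PySem.Chars.isdigit
               && ((cs.dropWhile (fun c => c != '.')).tail).all PySem.Chars.isdigit then "FLOAT"
       else if (match cs with
                | [] => false
                | c :: rest => (PySem.Chars.isalpha c || c == '_')
                    && rest.all (fun x => PySem.Chars.isalnum x || x == '_')) then "ID"
       else "ERROR") := by
  cases cs with
  | nil => simp [analyzeLoop]
  | cons c rest =>
    by_cases hd : PySem.Chars.isdigit c = true
    · -- first char a digit: A runs from state 1
      have hcdot : c ≠ '.' := dig_ne_dot hd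
      have h0 : analyzeLoop 0 (c :: rest) = analyzeLoop 1 rest := by simp [analyzeLoop, hd]
      rw [h0, loop1]
      by_cases hall : rest.all PySem.Chars.isdigit = true
      · -- all digits: INT on both sides
        have hnil : rest.dropWhile PySem.Chars.isdigit = [] := by
          rw [List.dropWhile_eq_nil_iff]
          simpa [List.all_eq_true] using hall
        simp [hnil, hd, hall]
      · -- a non-digit exists: FLOAT iff it is a '.' followed by digits only
        obtain ⟨d, t, hdt⟩ : ∃ d t, rest.dropWhile PySem.Chars.isdigit = d :: t := by
          cases hrw : rest.dropWhile PySem.Chars.isdigit with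
          | nil => exact absurd (by simpa [List.all_eq_true] using List.dropWhile_eq_nil_iff.mp hrw) hall
          | cons d t => exact ⟨d, t, rfl⟩
        have hw : ∀ x ∈ rest.takeWhile PySem.Chars.isdigit, PySem.Chars.isdigit x = true :=
          fun x hx => List.mem_takeWhile_imp hx
        have hwne : ∀ x ∈ rest.takeWhile PySem.Chars.isdigit, (x != '.') = true :=
          fun x hx => by simpa using dig_ne_dot (hw x hx)
        have hsplit : rest = rest.takeWhile PySem.Chars.isdigit ++ d :: t := by
          conv_lhs => rw [← List.takeWhile_append_dropWhile (p := PySem.Chars.isdigit) (l := rest)]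
          rw [hdt]
        rw [hdt]
        by_cases hfl : d = '.' ∧ t.all PySem.Chars.isdigit = true
        · -- FLOAT on both sides
          obtain ⟨hdd, htall⟩ := hfl
          subst hdd
          have hdrop : (c :: rest).dropWhile (fun c => c != '.') = '.' :: t := by
            rw [List.dropWhile_cons]
            simp only [show (c != '.') = true by simpa using hcdot, if_true]
            conv_lhs => rw [hsplit]
            rw [List.dropWhile_append_of_pos hwne]
            simp
          have htake : (c :: rest).takeWhile (fun c => c != '.') =
              c :: rest.takeWhile PySem.Chars.isdigit := by
            rw [List.takeWhile_cons]
            simp only [show (c != '.') = true by simpa using hcdot, if_true]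
            conv_lhs => rw [hsplit]
            rw [List.takeWhile_append_of_pos hwne]
            simp
          simp only [Bool.not_eq_true] at hall
          simp [hdrop, htake, hall, hd, htall]
        · -- ERROR on both sides
          have hflB : (!((c :: rest).dropWhile (fun c => c != '.')).isEmpty
              && !((c :: rest).takeWhile (fun c => c != '.')).isEmpty
              && ((c :: rest).takeWhile (fun c => c != '.')).all PySem.Chars.isdigit
              && (((c :: rest).dropWhile (fun c => c != '.')).tail).all PySem.Chars.isdigit) = false := by
            by_cases hdot : '.' ∈ rest
            · -- the partition splits rest at its first '.'
              obtain ⟨e, t', het⟩ : ∃ e t', rest.dropWhile (fun c => c != '.') = e :: t' := by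
                cases hrw : rest.dropWhile (fun c => c != '.') with
                | nil =>
                  have := List.dropWhile_eq_nil_iff.mp hrw
                  exact absurd (this '.' hdot) (by simp)
                | cons e t' => exact ⟨e, t', rfl⟩
              have hee : e = '.' := by
                have := dropWhile_head_false het
                simpa using this
              subst hee
              have hsplit2 : rest = rest.takeWhile (fun c => c != '.') ++ '.' :: t' := by
                conv_lhs => rw [← List.takeWhile_append_dropWhile (p := fun c => c != '.') (l := rest)]
                rw [het]
              have hdropc : (c :: rest).dropWhile (fun c => c != '.') = '.' :: t' := by
                rw [List.dropWhile_cons]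
                simpa [show (c != '.') = true by simpa using hcdot] using het
              have htakec : (c :: rest).takeWhile (fun c => c != '.') =
                  c :: rest.takeWhile (fun c => c != '.') := by
                rw [List.takeWhile_cons]
                simp [show (c != '.') = true by simpa using hcdot]
              rw [hdropc, htakec]
              -- if the remaining digit tests all held, A's dropWhile would have found '.' :: t'
              by_cases hu : (rest.takeWhile (fun c => c != '.')).all PySem.Chars.isdigit = true
              · by_cases ht' : t'.all PySem.Chars.isdigit = true
                · exfalso
                  have hune : ∀ x ∈ rest.takeWhile (fun c => c != '.'), PySem.Chars.isdigit x = true := by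
                    simpa [List.all_eq_true] using hu
                  have : rest.dropWhile PySem.Chars.isdigit = '.' :: t' := by
                    conv_lhs => rw [hsplit2]
                    rw [List.dropWhile_append_of_pos hune]
                    simp [show PySem.Chars.isdigit '.' = false from by decide]
                  rw [hdt] at this
                  cases this
                  exact hfl ⟨rfl, ht'⟩
                · simp only [Bool.not_eq_true] at ht'
                  simp [ht']
              · simp only [Bool.not_eq_true] at hu
                simp [hu, hd]
            · -- no '.' in rest at all: dropWhile never stops
              have hnil : (c :: rest).dropWhile (fun c => c != '.') = [] := by
                rw [List.dropWhile_eq_nil_iff]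
                intro x hx
                rcases List.mem_cons.mp hx with h | h
                · subst h; simpa using hcdot
                · have hxne : x ≠ '.' := fun he => hdot (he ▸ h)
                  simpa using hxne
              simp [hnil]
          simp only [Bool.not_eq_true] at hall
          have hfl' : ¬(d = '.' ∧ ∀ x ∈ t, PySem.Chars.isdigit x = true) := by
            simpa [List.all_eq_true] using hfl
          simp [hflB, hall, hd, dig_not_alpha hd,
            show (c == '_') = false by simpa using dig_ne_underscore hd, hfl']
    · simp only [Bool.not_eq_true] at hd
      by_cases ha : (PySem.Chars.isalpha c || c == '_') = true
      · -- identifier start: A runs from state 3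
        have hcdot : c ≠ '.' := by
          intro he; subst he; exact absurd ha (by decide)
        have h0 : analyzeLoop 0 (c :: rest) = analyzeLoop 3 rest := by simp [analyzeLoop, hd, ha]
        rw [h0, loop3]
        have htakec : (c :: rest).takeWhile (fun c => c != '.') =
            c :: rest.takeWhile (fun c => c != '.') := by
          rw [List.takeWhile_cons]
          simp [show (c != '.') = true by simpa using hcdot]
        by_cases h3 : rest.all (fun x => PySem.Chars.isalnum x || x == '_') = true
        · simp [htakec, hd, ha, h3]
        · simp only [Bool.not_eq_true] at h3
          simp [htakec, hd, ha, h3]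
      · -- anything else: state 5 on the first character, ERROR on both sides
        have h0 : analyzeLoop 0 (c :: rest) = 5 := by
          simp only [Bool.not_eq_true] at ha
          simp [analyzeLoop, hd, ha, loop5]
        rw [h0]
        simp only [Bool.not_eq_true] at ha
        obtain ⟨haf, hun⟩ : PySem.Chars.isalpha c = false ∧ (c == '_') = false := by
          constructor <;> [skip; skip] <;> first
            | (cases hA : PySem.Chars.isalpha c with
               | false => rfl
               | true => rw [hA] at ha; simp at ha)
            | (cases hU : (c == '_') with
               | false => rfl
               | true => rw [hU] at ha; simp at ha)
        by_cases hdot : c = '.'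
        · subst hdot
          have : ('.' :: rest).takeWhile (fun c => c != '.') = [] := by simp
          simp [this, hd, haf, hun]
        · have htakec : (c :: rest).takeWhile (fun c => c != '.') =
              c :: rest.takeWhile (fun c => c != '.') := by
            rw [List.takeWhile_cons]
            simp [show (c != '.') = true by simpa using hdot]
          simp [htakec, hd, haf, hun]

-- ===== VERDICT (by name: the statement is the Claim_ definition above) =====
theorem analyze_token_spec : Claim_equal_analyze_token := by
  intro token _
  unfold Spec_analyze_token analyze_token analyze_token_alt
  dsimp only
  rw [← kind_eq token.toList]
  split_ifs <;> (rw [String.append_assoc]) <;> rfl
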